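-- pv_equiv track=rewrite | github.com/Nekoshenka/crypto.lab2 | main.py | text_to_bits
-- ===== SOURCE A (Python) =====
-- def text_to_bits(text):
--     text_bytes = text.encode('utf-8')
--
--     length = len(text_bytes)
--     length_bits = []
--     for i in range(4):
--         length_bits.extend([int(b) for b in format((length >> (8 * (3 - i))) & 0xFF, '08b')])
--
--     data_bits = []
--     for byte in text_bytes:
--         data_bits.extend([int(b) for b in format(byte, '08b')])
--
--     return length_bits + data_bits
-- ===== SOURCE B (Python) =====
-- def text_to_bits(text):
--     data = text.encode('utf-8')
--     # 256-entry bit table built by dynamic programming: bits(b) = bits(b >> 1) shifted left, plus b's low bit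
--     table = [[0] * 8]
--     for b in range(1, 256):
--         table.append(table[b >> 1][1:] + [b & 1])
--     # 4 length bytes, little-endian by repeated divmod, emitted reversed (big-endian)
--     header = []
--     q = len(data)
--     for _ in range(4):
--         q, r = divmod(q, 256)
--         header.append(r)
--     bits = []
--     for byte in reversed(header):
--         bits += table[byte]
--     for byte in data:
--         bits += table[byte]
--     return bits
-- ===== Notes on version B (the rewrite author's own statement) =====
-- stated objective: faster
-- what changed: B precomputes a 256-entry bit table by dynamic programming (the bits of b derived from the bits of b>>1) and emits each byte's bits by table lookup, and builds the 4 length bytes little-endian by repeated divmod then reversed, instead of A's per-byte zero-padded binary string formatting and re-parsing and shift/mask header extraction.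
import Mathlib
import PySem

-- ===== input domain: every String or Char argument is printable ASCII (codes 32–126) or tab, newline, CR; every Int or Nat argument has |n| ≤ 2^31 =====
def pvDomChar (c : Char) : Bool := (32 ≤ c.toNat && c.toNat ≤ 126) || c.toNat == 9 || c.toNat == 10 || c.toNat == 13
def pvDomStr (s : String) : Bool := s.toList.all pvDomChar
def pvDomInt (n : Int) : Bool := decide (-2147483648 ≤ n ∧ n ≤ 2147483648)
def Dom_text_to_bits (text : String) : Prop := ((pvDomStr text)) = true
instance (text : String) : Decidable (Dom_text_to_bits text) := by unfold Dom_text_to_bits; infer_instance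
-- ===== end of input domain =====

-- faster constant factor: B replaces A's per-byte binary string formatting and shift/mask header extraction by a
-- DP-built 256-entry bit-table lookup and a divmod-accumulated (then reversed) length header.

-- ===== PORT A =====
-- the 8 binary digits of A's zero-padded byte formatting, most significant first;
-- exact for 0 ≤ n < 256 (every argument A passes: '& 0xFF' results and ASCII codes ≤ 126 on Dom)
def pvFmt08b (n : Int) : List Int :=
  [PySem.Int.mod (PySem.Int.floordiv n 128) 2, PySem.Int.mod (PySem.Int.floordiv n 64) 2,
   PySem.Int.mod (PySem.Int.floordiv n 32) 2, PySem.Int.mod (PySem.Int.floordiv n 16) 2,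
   PySem.Int.mod (PySem.Int.floordiv n 8) 2, PySem.Int.mod (PySem.Int.floordiv n 4) 2,
   PySem.Int.mod (PySem.Int.floordiv n 2) 2, PySem.Int.mod n 2]

def text_to_bits (text : String) : List Int :=
  -- text.encode('utf-8'): exact on Dom (ASCII only ⇒ one byte per char, value = code point)
  let text_bytes : List Int := text.toList.map (fun c => (c.toNat : Int))
  let length : Int := text_bytes.length
  let length_bits := (PySem.List.pyRange 0 4 1).foldl
    (fun acc i => acc ++ pvFmt08b (PySem.Int.band (length >>> (8 * (3 - i)).toNat) 255)) []
    -- '>> (8 * (3 - i))': shift count via .toNat, exact since i ∈ [0,4) makes 8*(3-i) ≥ 0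
  let data_bits := text_bytes.foldl (fun acc byte => acc ++ pvFmt08b byte) []
  length_bits ++ data_bits

-- ===== PORT B =====
-- table.append(table[b >> 1][1:] + [b & 1]); 'b >> 1' via .toNat is exact since 1 ≥ 0;
-- indexing with .getD [] only totalizes (b >> 1 < len(table) at every step)
def pvTable : List (List Int) :=
  (PySem.List.pyRange 1 256 1).foldl
    (fun t (b : Int) =>
      t ++ [PySem.List.slice ((PySem.List.pyGet? t (b >>> (1:Int).toNat)).getD []) (some 1) none
            ++ [PySem.Int.band b 1]])
    [[0, 0, 0, 0, 0, 0, 0, 0]]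

def text_to_bits_alt (text : String) : List Int :=
  -- text.encode('utf-8'): exact on Dom (ASCII only ⇒ one byte per char, value = code point)
  let data : List Int := text.toList.map (fun c => (c.toNat : Int))
  let st := (PySem.List.pyRange 0 4 1).foldl
    (fun (st : Int × List Int) _ =>
      (PySem.Int.floordiv st.1 256, st.2 ++ [PySem.Int.mod st.1 256]))
    ((data.length : Int), [])
  let header := st.2
  -- bits += table[byte]; indexing with .getD [] only totalizes (every byte is in [0, 256))
  let bits := header.reverse.foldl
    (fun acc byte => acc ++ (PySem.List.pyGet? pvTable byte).getD []) []
  data.foldl (fun acc byte => acc ++ (PySem.List.pyGet? pvTable byte).getD []) bits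

-- ===== PRECONDITION & SPEC =====
def Spec_text_to_bits (text : String) (out : List Int) : Prop := out = text_to_bits_alt text
instance (text : String) (out : List Int) : Decidable (Spec_text_to_bits text out) := by unfold Spec_text_to_bits; infer_instance

-- ===== CLAIM (what is proved, stated in full; the proofs are below) =====
def Claim_equal_text_to_bits : Prop := ∀ (text : String), Dom_text_to_bits text → Spec_text_to_bits text (text_to_bits text)

-- ===== LEMMAS AND PROOFS =====

-- the DP-built table is, entry by entry, A's 8-digit expansion
set_option maxRecDepth 4000 in
theorem pvTable_eq : pvTable = (List.range 256).map (fun b : Nat => pvFmt08b (b : Int)) := by decide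

theorem pvLookup (b : Nat) (hb : b < 256) :
    (PySem.List.pyGet? pvTable ((b : Nat) : Int)).getD [] = pvFmt08b (b : Int) := by
  rw [pvTable_eq, PySem.List.pyGet?_natCast, List.getElem?_map, List.getElem?_range hb]
  rfl

-- the Int-indexed '>>' of port A is the Nat-indexed shift
theorem pvShiftRight_intCast (n : Int) (m : Nat) : n >>> (m : Int) = n >>> m := by
  show n <<< (-(m:Int)) = n >>> m
  rcases n with a | a
  · rcases m with _ | k <;> rfl
  · rcases m with _ | k <;> rfl

-- A's masked-shift header byte, in Nat form
theorem pvHdrByte (n k : Nat) :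
    PySem.Int.band ((n:Int) >>> (8 * k)) 255 = ((n / 256 ^ k % 256 : Nat) : Int) := by
  rw [← Int.natCast_shiftRight, show (255:Int) = ((255:Nat):Int) from by norm_num,
      PySem.Int.band_natCast]
  congr 1
  rw [show (255:Nat) = 2 ^ 8 - 1 from rfl, Nat.and_two_pow_sub_one_eq_mod,
      Nat.shiftRight_eq_div_pow, pow_mul]
  norm_num

-- B's divmod steps, in Nat form
theorem pvModN (n : Nat) : PySem.Int.mod (n:Int) 256 = ((n % 256 : Nat) : Int) := by
  exact_mod_cast PySem.Int.mod_natCast n 256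

theorem pvDivN (n : Nat) : PySem.Int.floordiv (n:Int) 256 = ((n / 256 : Nat) : Int) := by
  exact_mod_cast PySem.Int.floordiv_natCast n 256

theorem pvFlatMap_congr {α β : Type} (f g : α → List β) (l : List α)
    (h : ∀ x ∈ l, f x = g x) : l.flatMap f = l.flatMap g := by
  induction l with
  | nil => rfl
  | cons a t ih => simp_all [List.flatMap_cons]

-- ===== VERDICT (by name: the statement is the Claim_ definition above) =====
theorem text_to_bits_spec : Claim_equal_text_to_bits := by
  intro text hdom
  show text_to_bits text = text_to_bits_alt text
  unfold text_to_bits text_to_bits_alt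
  rw [show PySem.List.pyRange 0 4 1 = [0,1,2,3] from by decide]
  simp only [PySem.List.foldl_append_eq_flatMap, List.foldl_cons, List.foldl_nil,
    List.nil_append, List.length_map, List.reverse_cons, List.reverse_nil,
    List.cons_append]
  rw [show ((8:Int) * (3 - 0)).toNat = (8 * 3 : Nat) from rfl,
      show ((8:Int) * (3 - 1)).toNat = (8 * 2 : Nat) from rfl,
      show ((8:Int) * (3 - 2)).toNat = (8 * 1 : Nat) from rfl,
      show ((8:Int) * (3 - 3)).toNat = (8 * 0 : Nat) from rfl,
      pvShiftRight_intCast, pvShiftRight_intCast, pvShiftRight_intCast, pvShiftRight_intCast,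
      pvHdrByte, pvHdrByte, pvHdrByte, pvHdrByte]
  simp only [pvDivN, pvModN]
  have hl : ∀ m : Nat, (PySem.List.pyGet? pvTable (((m % 256 : Nat) : Nat) : Int)).getD []
      = pvFmt08b ((m % 256 : Nat) : Int) := fun m => pvLookup _ (Nat.mod_lt _ (by norm_num))
  rw [hl, hl, hl, hl]
  simp only [Nat.div_div_eq_div_mul]
  norm_num
  apply pvFlatMap_congr
  intro x hx
  obtain ⟨c, hc, rfl⟩ := List.mem_map.mp hx
  have hcd : pvDomChar c = true := by
    have := List.all_eq_true.mp hdom c hc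
    exact this
  have hlt : c.toNat < 256 := by
    unfold pvDomChar at hcd
    simp only [Bool.or_eq_true, Bool.and_eq_true, decide_eq_true_eq, beq_iff_eq] at hcd
    omega
  exact (pvLookup c.toNat hlt).symm
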